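-- pv_equiv track=rewrite | github.com/ae86sen/aomaker | aomaker/yaml2case.py | _handle_data_driven
-- ===== SOURCE A (Python) =====
-- from typing import List, Dict, Mapping, Text
-- from itertools import zip_longest
--
-- def _handle_data_driven(step_data: Mapping[Text, List]) -> List[Dict]:
--     """
--     step_data:
--
--     step_data = {
--         'user_name': ['admin1', 'admin2', 'admin3'],
--         'password': ['zhu8jie', 'zhu9jie', 'zhu10jie']
--     }
--
--     return：
--
--     step_data = [
--         {username:admin1,password:zhu88jie},
--         {username:admin2,password:zhu9jie}
--     ]
--     """
--     keys = list(step_data.keys())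
--     values = list(step_data.values())
--     new_step_data = list()
--     for v in zip_longest(*values):
--         dic = dict()
--         for k, vv in zip(keys, v):
--             dic[k] = vv
--         for k, value in dic.items():
--             if value is None:
--                 dic[k] = new_step_data[-1][k]
--         new_step_data.append(dic)
--     return new_step_data
-- ===== SOURCE B (Python) =====
-- from typing import List, Dict, Mapping, Text
--
-- def _handle_data_driven(step_data: Mapping[Text, List]) -> List[Dict]:
--     n = max(map(len, step_data.values()), default=0)
--     padded = {k: list(v) + v[-1:] * (n - len(v)) for k, v in step_data.items()}
--     return [dict(zip(padded, row)) for row in zip(*padded.values())]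
-- ===== Notes on version B (the rewrite author's own statement) =====
-- stated objective: simpler
-- what changed: B first pads every column to the max length by repeating that column's own last value (v[-1:] * gap), then transposes with plain zip into row dicts; A transposes first with zip_longest and then repairs each row dict's None entries from the previous row.
import Mathlib
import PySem

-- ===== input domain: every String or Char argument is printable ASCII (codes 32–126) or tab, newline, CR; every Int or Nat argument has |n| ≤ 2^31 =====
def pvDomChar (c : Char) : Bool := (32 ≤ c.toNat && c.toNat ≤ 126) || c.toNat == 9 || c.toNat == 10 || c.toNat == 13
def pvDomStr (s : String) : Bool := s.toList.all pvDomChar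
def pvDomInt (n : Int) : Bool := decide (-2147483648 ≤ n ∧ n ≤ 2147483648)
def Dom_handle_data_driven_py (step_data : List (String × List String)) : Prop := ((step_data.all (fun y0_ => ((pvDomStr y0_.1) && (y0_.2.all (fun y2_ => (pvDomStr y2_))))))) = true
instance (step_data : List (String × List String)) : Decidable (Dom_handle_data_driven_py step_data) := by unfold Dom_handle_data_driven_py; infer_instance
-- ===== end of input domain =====

-- B pads every column to the max length with that column's own last value and then transposes with
-- plain zip, instead of A's zip_longest transpose followed by repairing None gaps from the previous
-- row dict (objective: simpler).

-- ===== PORT A =====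
-- termination helpers for the zip_longest / zip recursions (cited by decreasing_by)
theorem pv_tail_len_le (b : List String) : b.tail.length ≤ b.length := by cases b <;> simp

theorem pv_sum_lt (l : List (List String)) (c : List String) (hc : c ∈ l) (hne : c ≠ []) :
    (l.map (fun x => x.tail.length)).sum < (l.map List.length).sum := by
  induction l with
  | nil => cases hc
  | cons a tl ih =>
    simp only [List.map_cons, List.sum_cons]
    have h2 : (tl.map (fun x => x.tail.length)).sum ≤ (tl.map List.length).sum := by
      clear ih hc
      induction tl with
      | nil => simp
      | cons b tb ihb =>
        simp only [List.map_cons, List.sum_cons]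
        have := pv_tail_len_le b
        omega
    rcases List.mem_cons.mp hc with heq | hc
    · subst heq
      have h1 : c.tail.length < c.length := by
        cases c with
        | nil => exact absurd rfl hne
        | cons x xs => simp
      omega
    · have h1 := pv_tail_len_le a
      have := ih hc
      omega

-- itertools.zip_longest(*cols) with fillvalue None: emit all heads, recurse on the tails, until all columns are exhausted
def pvZipLongest (cols : List (List String)) : List (List (Option String)) :=
  if h : cols.all (fun c => c.isEmpty) then []
  else (cols.map (fun c => c.head?)) :: pvZipLongest (cols.map (fun c => c.tail))
termination_by (cols.map List.length).sum
decreasing_by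
  simp only [List.all_eq_true, List.isEmpty_iff] at h
  rw [Classical.not_forall] at h
  obtain ⟨c, hc⟩ := h
  rw [Classical.not_imp] at hc
  simp only [List.map_map, Function.comp_def]
  rw [List.attach_map_val (f := fun x : List String => x.tail.length)]
  exact pv_sum_lt cols c hc.1 hc.2

def handle_data_driven_py (step_data : List (String × List String)) : List (List (String × String)) :=
  let keys := step_data.map Prod.fst
  let values := step_data.map Prod.snd
  (pvZipLongest values).foldl (fun new_step_data v =>
    -- dic = {}; for k, vv in zip(keys, v): dic[k] = vv
    let dic : PySem.Dict String (Option String) :=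
      (keys.zip v).foldl (fun d p => d.insert p.1 p.2) PySem.Dict.empty
    -- for k, value in dic.items(): if value is None: dic[k] = new_step_data[-1][k]
    let dic2 : PySem.Dict String (Option String) :=
      dic.items.foldl (fun d p =>
        if p.2 = none then
          d.insert p.1 (some ((PySem.Dict.mk (PySem.List.pyGetD new_step_data (-1) [])).getD p.1 ""))
        else d) dic
    -- every value is `some` at this point (each None was just replaced); `.getD ""` only unwraps
    new_step_data ++ [dic2.items.map (fun p => (p.1, p.2.getD ""))]) []

-- ===== PORT B =====
-- zip(*padded.values()): stop as soon as some column is exhausted; zip() of no iterables is empty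
def pvZipRows (cols : List (List String)) : List (List String) :=
  if h : cols.isEmpty || cols.any (fun c => c.isEmpty) then []
  else (cols.map (fun c => c.headD "")) :: pvZipRows (cols.map (fun c => c.tail))
termination_by (cols.map List.length).sum
decreasing_by
  simp only [Bool.or_eq_true, List.isEmpty_iff, List.any_eq_true, not_or] at h
  obtain ⟨hne, hall⟩ := h
  push_neg at hall
  simp only [List.map_map, Function.comp_def]
  rw [List.attach_map_val (f := fun x : List String => x.tail.length)]
  refine pv_sum_lt cols (cols.headD []) ?_ ?_
  · cases cols with
    | nil => exact absurd rfl hne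
    | cons a tl => exact List.mem_cons_self
  · cases cols with
    | nil => exact absurd rfl hne
    | cons a tl =>
      have := hall a List.mem_cons_self
      simpa [List.isEmpty_iff] using this

def handle_data_driven_py_alt (step_data : List (String × List String)) : List (List (String × String)) :=
  -- n = max(map(len, step_data.values()), default=0)
  let n := (step_data.map (fun p => p.2.length)).foldl max 0
  -- padded = {k: list(v) + v[-1:] * (n - len(v)) for k, v in step_data.items()}
  let padded := step_data.map (fun p =>
    (p.1, p.2 ++ (List.replicate (n - p.2.length) (PySem.List.slice p.2 (some (-1)) none)).flatten))
  -- [dict(zip(padded, row)) for row in zip(*padded.values())]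
  (pvZipRows (padded.map Prod.snd)).map (fun row =>
    (PySem.Dict.ofList ((padded.map Prod.fst).zip row)).items)

-- ===== PRECONDITION & SPEC =====
-- Keys must be distinct because A's argument is a Python dict (every dict argument satisfies this);
-- columns must be all nonempty or all empty: a shorter-than-max empty column makes A's first-row
-- forward fill evaluate new_step_data[-1] before any row exists, an IndexError — exactly where A raises.
def Pre_handle_data_driven_py (step_data : List (String × List String)) : Prop :=
  (step_data.map Prod.fst).Nodup ∧
    ((∀ p ∈ step_data, p.2 ≠ []) ∨ (∀ p ∈ step_data, p.2 = []))
instance (step_data : List (String × List String)) : Decidable (Pre_handle_data_driven_py step_data) := by unfold Pre_handle_data_driven_py; infer_instance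

def pvWitness_handle_data_driven_py : (List (String × List String)) :=
  [("user_name", ["admin1", "admin2", "admin3"]), ("password", ["zhu8jie"])]

def Spec_handle_data_driven_py (step_data : List (String × List String)) (out : List (List (String × String))) : Prop := out = handle_data_driven_py_alt step_data
instance (step_data : List (String × List String)) (out : List (List (String × String))) : Decidable (Spec_handle_data_driven_py step_data out) := by unfold Spec_handle_data_driven_py; infer_instance

-- ===== CLAIM (what is proved, stated in full; the proofs are below) =====
def Claim_equal_handle_data_driven_py : Prop := ∀ (step_data : List (String × List String)), Dom_handle_data_driven_py step_data → Pre_handle_data_driven_py step_data → Spec_handle_data_driven_py step_data (handle_data_driven_py step_data)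

-- ===== LEMMAS AND PROOFS =====

-- the common shape both programs compute: max column length, and row i = value at i, else the column's last value
def pvMx (sd : List (String × List String)) : Nat := (sd.map (fun p => p.2.length)).foldl max 0

def pvRow (sd : List (String × List String)) (i : Nat) : List (String × String) :=
  sd.map (fun p => (p.1, (p.2[i]?).getD (p.2.getLastD "")))

theorem pv_foldl_max_eq_zero (ls : List Nat) (a : Nat) :
    ls.foldl max a = 0 ↔ a = 0 ∧ ∀ x ∈ ls, x = 0 := by
  induction ls generalizing a with
  | nil => simp
  | cons x tl ih =>
    simp only [List.foldl_cons, ih, List.mem_cons]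
    constructor
    · rintro ⟨h1, h2⟩
      exact ⟨by omega, fun y hy => by rcases hy with rfl | hy; omega; exact h2 y hy⟩
    · rintro ⟨h1, h2⟩
      exact ⟨by have := h2 x (Or.inl rfl); omega, fun y hy => h2 y (Or.inr hy)⟩

theorem pv_foldl_max_sub_one (ls : List Nat) (a : Nat) :
    (ls.map (fun x => x - 1)).foldl max (a - 1) = ls.foldl max a - 1 := by
  induction ls generalizing a with
  | nil => rfl
  | cons x tl ih =>
    simp only [List.map_cons, List.foldl_cons]
    rw [show max (a - 1) (x - 1) = max a x - 1 by omega]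
    exact ih _

theorem pv_foldl_max_init (ls : List Nat) (a : Nat) :
    ls.foldl max a = max a (ls.foldl max 0) := by
  induction ls generalizing a with
  | nil => simp
  | cons x tl ih =>
    simp only [List.foldl_cons]
    rw [ih (max a x), ih (max 0 x)]
    omega

theorem pv_le_foldl_max (ls : List Nat) (x : Nat) (hx : x ∈ ls) : x ≤ ls.foldl max 0 := by
  induction ls with
  | nil => cases hx
  | cons b tl ih =>
    simp only [List.foldl_cons]
    rw [pv_foldl_max_init]
    rcases List.mem_cons.mp hx with rfl | hx
    · omega
    · have := ih hx
      omega

theorem pvZipLongest_eq : ∀ (n : Nat) (cols : List (List String)),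
    (cols.map List.length).foldl max 0 = n →
    pvZipLongest cols = (List.range n).map (fun i => cols.map (fun c => (c)[i]?)) := by
  intro n
  induction n with
  | zero =>
    intro cols h
    have hall : cols.all (fun c => c.isEmpty) = true := by
      rw [pv_foldl_max_eq_zero] at h
      simp only [List.all_eq_true, List.isEmpty_iff]
      intro c hc
      have := h.2 c.length (List.mem_map_of_mem hc)
      simpa [List.length_eq_zero_iff] using this
    rw [pvZipLongest, dif_pos hall]
    rfl
  | succ n ih =>
    intro cols h
    have hnall : ¬ (cols.all (fun c => c.isEmpty) = true) := by
      intro hall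
      have h0 : (cols.map List.length).foldl max 0 = 0 := by
        rw [pv_foldl_max_eq_zero]
        refine ⟨rfl, fun x hx => ?_⟩
        obtain ⟨c, hc, rfl⟩ := List.mem_map.1 hx
        simp only [List.all_eq_true, List.isEmpty_iff] at hall
        simp [hall c hc]
      omega
    rw [pvZipLongest, dif_neg hnall]
    have htail : ((cols.map (fun c => c.tail)).map List.length).foldl max 0 = n := by
      rw [List.map_map]
      rw [show (List.length ∘ fun c : List String => c.tail)
            = (fun x => x - 1) ∘ List.length by funext c; simp [List.length_tail]]
      rw [← List.map_map]
      have := pv_foldl_max_sub_one (cols.map List.length) 0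
      simp only [Nat.zero_sub] at this
      rw [this]
      omega
    rw [ih _ htail, List.range_succ_eq_map]
    simp only [List.map_cons, List.map_map]
    refine congrArg₂ _ ?_ ?_
    · apply List.map_congr_left
      intro c _
      simp [List.head?_eq_getElem?]
    · apply List.map_congr_left
      intro i _
      simp only [Function.comp_def, List.map_map]
      apply List.map_congr_left
      intro c _
      simp [List.getElem?_tail]

theorem pv_getD_mk_map (g : String × List String → String) :
    ∀ (sd : List (String × List String)), (sd.map Prod.fst).Nodup → ∀ p ∈ sd,
      (PySem.Dict.mk (sd.map (fun q => (q.1, g q)))).getD p.1 "" = g p := by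
  intro sd
  induction sd with
  | nil => simp
  | cons q tl ih =>
    intro hnd p hp
    simp only [List.map_cons, List.nodup_cons] at hnd
    rw [PySem.Dict.getD_eq_get?_getD]
    simp only [List.map_cons]
    rw [PySem.Dict.get?_mk_cons]
    rcases List.mem_cons.mp hp with heq | hp
    · subst heq
      simp
    · have hne : (q.1 == p.1) = false := by
        have hmem : p.1 ∈ tl.map Prod.fst := List.mem_map_of_mem hp
        simp only [beq_eq_false_iff_ne]
        intro he
        exact hnd.1 (he ▸ hmem)
      rw [hne]
      simp only [Bool.false_eq_true, if_false]
      rw [← PySem.Dict.getD_eq_get?_getD]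
      exact ih hnd.2 p hp

theorem pv_row_eq (sd : List (String × List String)) (hnd : (sd.map Prod.fst).Nodup)
    (hne : ∀ p ∈ sd, p.2 ≠ []) (i : Nat) :
    (sd.map (fun p => ((p.1 : String),
      match p.2[i]? with
      | some v => v
      | none => (PySem.Dict.mk (PySem.List.pyGetD ((List.range i).map (pvRow sd)) (-1)
          ([] : List (String × String)))).getD p.1 ""))) = pvRow sd i := by
  rw [show pvRow sd i
      = sd.map (fun p => ((p.1 : String), (p.2[i]?).getD (p.2.getLastD ""))) from rfl]
  apply List.map_congr_left
  intro p hp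
  by_cases h : i < p.2.length
  · simp [List.getElem?_eq_getElem h]
  · have hnone : p.2[i]? = none := List.getElem?_eq_none (by omega)
    have hlen : 1 ≤ p.2.length := List.length_pos_of_ne_nil (hne p hp)
    have hi1 : 1 ≤ i := by omega
    rw [hnone]
    have hacc : PySem.List.pyGetD ((List.range i).map (pvRow sd)) (-1)
        ([] : List (String × String)) = pvRow sd (i - 1) := by
      have hne' : (List.range i).map (pvRow sd) ≠ [] := by
        simp only [ne_eq, List.map_eq_nil_iff, List.range_eq_nil]
        omega
      rw [PySem.List.pyGetD_neg_one _ _ hne']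
      rw [List.getLast_eq_getElem]
      simp [List.getElem_map, List.getElem_range]
    show ((p.1 : String), (PySem.Dict.mk (PySem.List.pyGetD ((List.range i).map (pvRow sd)) (-1)
        ([] : List (String × String)))).getD p.1 "") = (p.1, p.2.getLastD "")
    rw [hacc]
    have hg : (PySem.Dict.mk (pvRow sd (i - 1))).getD p.1 ""
        = (p.2[i - 1]?).getD (p.2.getLastD "") :=
      pv_getD_mk_map (fun q => (q.2[i - 1]?).getD (q.2.getLastD "")) sd hnd p hp
    rw [hg]
    by_cases h2 : i - 1 < p.2.length
    · have he : i - 1 = p.2.length - 1 := by omega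
      rw [he, List.getElem?_eq_getElem (show p.2.length - 1 < p.2.length by omega)]
      simp [List.getLastD_eq_getLast?, List.getLast?_eq_getElem?,
        List.getElem?_eq_getElem (show p.2.length - 1 < p.2.length by omega)]
    · simp [List.getElem?_eq_none (show p.2.length ≤ i - 1 by omega)]

theorem pv_foldl_rows {α : Type} (f : List α → Nat → α) (g : Nat → α)
    (h : ∀ n, f ((List.range n).map g) n = g n) :
    ∀ n, (List.range n).foldl (fun acc i => acc ++ [f acc i]) [] = (List.range n).map g := by
  intro n
  induction n with
  | zero => rfl
  | succ n ih =>
    rw [List.range_succ, List.foldl_append, List.map_append, ih]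
    simp [h n]

theorem pv_fixFold (F : String → String) :
    ∀ (ps pre : List (String × Option String)) (d : PySem.Dict String (Option String)),
      d.items = pre ++ ps → (d.items.map Prod.fst).Nodup →
      (ps.foldl (fun d p => if p.2 = none then d.insert p.1 (some (F p.1)) else d) d).items
        = pre ++ ps.map (fun p => if p.2 = none then (p.1, some (F p.1)) else p) := by
  intro ps
  induction ps with
  | nil =>
    intro pre d hd _
    simpa using hd
  | cons p tl ih =>
    intro pre d hd hnd
    have hnd2 : (pre.map Prod.fst ++ p.1 :: tl.map Prod.fst).Nodup := by
      have h0 := hnd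
      rw [hd] at h0
      simpa using h0
    have hq_pre : ∀ q ∈ pre, ¬ q.1 = p.1 := by
      intro q hq he
      exact (List.disjoint_of_nodup_append hnd2) (List.mem_map_of_mem hq)
        (by rw [he]; exact List.mem_cons_self)
    have hq_tl : ∀ q ∈ tl, ¬ q.1 = p.1 := by
      intro q hq he
      have hcn : (p.1 :: tl.map Prod.fst).Nodup := hnd2.of_append_right
      exact (List.nodup_cons.mp hcn).1 (he ▸ List.mem_map_of_mem hq)
    simp only [List.foldl_cons]
    by_cases hp : p.2 = none
    · rw [if_pos hp]
      have hcont : d.contains p.1 = true := by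
        rw [PySem.Dict.contains_iff_mem_keys]
        show p.1 ∈ d.keys
        have : d.keys = d.items.map Prod.fst := rfl
        rw [this, hd]
        simp
      have hitems' : (d.insert p.1 (some (F p.1))).items
          = pre ++ (p.1, some (F p.1)) :: tl := by
        simp only [PySem.Dict.items_insert, hcont, if_true]
        rw [hd, List.map_append, List.map_cons]
        congr 1
        · have hid : ∀ q ∈ pre, (if q.1 == p.1 then (p.1, some (F p.1)) else q) = id q := by
            intro q hq
            simp only [id]
            rw [if_neg]
            simp only [beq_iff_eq]
            exact hq_pre q hq
          rw [List.map_congr_left hid, List.map_id]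
        · simp only [List.map_cons, BEq.rfl, if_true]
          congr 1
          have hid : ∀ q ∈ tl, (if q.1 == p.1 then (p.1, some (F p.1)) else q) = id q := by
            intro q hq
            simp only [id]
            rw [if_neg]
            simp only [beq_iff_eq]
            exact hq_tl q hq
          rw [List.map_congr_left hid, List.map_id]
      have hmapfst : (d.insert p.1 (some (F p.1))).items.map Prod.fst
          = d.items.map Prod.fst := by
        rw [hitems', hd]
        simp
      rw [ih (pre ++ [(p.1, some (F p.1))]) _ (by rw [hitems']; simp) (by rw [hmapfst]; exact hnd)]
      simp [hp]
    · rw [if_neg hp]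
      rw [ih (pre ++ [p]) d (by rw [hd]; simp) hnd]
      simp [hp]

theorem pv_rowA_eq (sd : List (String × List String)) (hnd : (sd.map Prod.fst).Nodup)
    (hne : ∀ p ∈ sd, p.2 ≠ []) (n : Nat) (dic : PySem.Dict String (Option String))
    (hdic : dic = ((sd.map Prod.fst).zip ((sd.map Prod.snd).map (fun c => (c)[n]?))).foldl
      (fun d p => d.insert p.1 p.2) PySem.Dict.empty) :
    (dic.items.foldl (fun d p =>
        if p.2 = none then
          d.insert p.1 (some ((PySem.Dict.mk (PySem.List.pyGetD ((List.range n).map (pvRow sd)) (-1)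
            ([] : List (String × String)))).getD p.1 ""))
        else d) dic).items.map (fun p => (p.1, p.2.getD "")) = pvRow sd n := by
  have hzip : (sd.map Prod.fst).zip ((sd.map Prod.snd).map (fun c => (c)[n]?))
      = sd.map (fun p => (p.1, p.2[n]?)) := by
    rw [List.map_map]
    exact List.zip_map'
  rw [hzip] at hdic
  have hndl : ((sd.map (fun p => ((p.1 : String), p.2[n]?))).map Prod.fst).Nodup := by
    rw [List.map_map]
    exact hnd
  have hitems : dic.items = sd.map (fun p => (p.1, p.2[n]?)) := by
    rw [hdic, PySem.Dict.items_foldl_insert_fresh]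
    · simp [PySem.Dict.empty, Function.comp_def]
    · intro a _
      exact PySem.Dict.contains_empty a.1
    · exact hndl
  have hfix := pv_fixFold
    (fun k => (PySem.Dict.mk (PySem.List.pyGetD ((List.range n).map (pvRow sd)) (-1)
      ([] : List (String × String)))).getD k "")
    (sd.map (fun p => (p.1, p.2[n]?))) [] dic (by simpa using hitems)
    (by rw [hitems]; exact hndl)
  simp only [List.nil_append] at hfix
  rw [hitems, hfix, ← pv_row_eq sd hnd hne n, List.map_map, List.map_map]
  apply List.map_congr_left
  intro p _
  cases hv : p.2[n]? with
  | some v => simp [Function.comp_def, hv]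
  | none => simp [Function.comp_def, hv]

theorem pv_a_eq (sd : List (String × List String)) (hnd : (sd.map Prod.fst).Nodup)
    (hne : ∀ p ∈ sd, p.2 ≠ []) :
    handle_data_driven_py sd = (List.range (pvMx sd)).map (pvRow sd) := by
  simp only [handle_data_driven_py]
  rw [pvZipLongest_eq (pvMx sd) (sd.map Prod.snd) (by rw [List.map_map]; rfl)]
  rw [List.foldl_map]
  exact pv_foldl_rows
    (fun acc i =>
      (((sd.map Prod.fst).zip ((sd.map Prod.snd).map (fun c => (c)[i]?))).foldl
          (fun d p => d.insert p.1 p.2) PySem.Dict.empty).items.foldl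
        (fun d p =>
          if p.2 = none then
            d.insert p.1 (some ((PySem.Dict.mk (PySem.List.pyGetD acc (-1) [])).getD p.1 ""))
          else d)
        (((sd.map Prod.fst).zip ((sd.map Prod.snd).map (fun c => (c)[i]?))).foldl
          (fun d p => d.insert p.1 p.2) PySem.Dict.empty)
      |>.items.map (fun p => (p.1, p.2.getD "")))
    (pvRow sd) (fun n => pv_rowA_eq sd hnd hne n _ rfl) (pvMx sd)

-- ===== B-side lemmas =====

-- the padded column of a nonempty column: original values, then its last value repeated up to n
theorem pv_pad_eq (cl : List String) (hc : cl ≠ []) (n : Nat) :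
    cl ++ (List.replicate (n - cl.length) (PySem.List.slice cl (some (-1)) none)).flatten
      = cl ++ List.replicate (n - cl.length) (cl.getLastD "") := by
  congr 1
  rw [PySem.List.slice_from_neg_one]
  have hdrop : cl.drop (cl.length - 1) = [cl.getLastD ""] := by
    induction cl with
    | nil => exact absurd rfl hc
    | cons x tl ih =>
      cases tl with
      | nil => simp
      | cons y tb =>
        have h := ih (by simp)
        simp only [List.length_cons] at h ⊢
        rw [show tb.length + 1 + 1 - 1 = (tb.length + 1 - 1) + 1 by omega, List.drop_succ_cons, h]
        simp
  rw [hdrop]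
  simp

theorem pv_pad_len (cl : List String) (hc : cl ≠ []) (n : Nat) (hn : cl.length ≤ n) :
    (cl ++ List.replicate (n - cl.length) (cl.getLastD "")).length = n := by
  simp
  omega

theorem pv_pad_get (cl : List String) (n i : Nat) (hi : i < n) :
    ((cl ++ List.replicate (n - cl.length) (cl.getLastD ""))[i]?).getD ""
      = (cl[i]?).getD (cl.getLastD "") := by
  by_cases h : i < cl.length
  · rw [List.getElem?_append_left h, List.getElem?_eq_getElem h]
    rfl
  · rw [List.getElem?_append_right (by omega), List.getElem?_eq_none (show cl.length ≤ i by omega)]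
    rw [List.getElem?_replicate]
    rw [if_pos (by omega)]
    rfl

-- zip(*cols) on a nonempty family of equal-length columns is the n×k transpose
theorem pvZipRows_eq : ∀ (n : Nat) (cols : List (List String)), cols ≠ [] →
    (∀ c ∈ cols, c.length = n) →
    pvZipRows cols = (List.range n).map (fun i => cols.map (fun cl => ((cl)[i]?).getD "")) := by
  intro n
  induction n with
  | zero =>
    intro cols hne hlen
    rw [pvZipRows, dif_pos]
    · rfl
    · cases cols with
      | nil => exact absurd rfl hne
      | cons a tl =>
        simp only [Bool.or_eq_true, List.any_eq_true]
        right
        exact ⟨a, List.mem_cons_self, by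
          simpa [List.isEmpty_iff, List.length_eq_zero_iff] using hlen a List.mem_cons_self⟩
  | succ n ih =>
    intro cols hne hlen
    rw [pvZipRows, dif_neg]
    · have htne : cols.map (fun c => c.tail) ≠ [] := by
        simpa using hne
      have htlen : ∀ c ∈ cols.map (fun c => c.tail), c.length = n := by
        intro c hc
        obtain ⟨c0, hc0, rfl⟩ := List.mem_map.1 hc
        have := hlen c0 hc0
        simp [List.length_tail, this]
      rw [ih _ htne htlen, List.range_succ_eq_map]
      simp only [List.map_cons, List.map_map]
      refine congrArg₂ _ ?_ ?_
      · apply List.map_congr_left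
        intro c hc
        have hl := hlen c hc
        cases c with
        | nil => simp at hl
        | cons x tl => simp
      · apply List.map_congr_left
        intro i _
        simp only [Function.comp_def, List.map_map]
        apply List.map_congr_left
        intro c _
        simp [List.getElem?_tail]
    · simp only [Bool.or_eq_true, List.isEmpty_iff, List.any_eq_true, not_or]
      constructor
      · exact hne
      · push_neg
        intro c hc
        have := hlen c hc
        intro h0
        rw [h0] at this
        simp at this

theorem pv_alt_eq (sd : List (String × List String)) (hnd : (sd.map Prod.fst).Nodup)
    (hne : ∀ p ∈ sd, p.2 ≠ []) :
    handle_data_driven_py_alt sd = (List.range (pvMx sd)).map (pvRow sd) := by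
  cases hsd : sd with
  | nil =>
    simp only [handle_data_driven_py_alt, List.map_nil]
    rw [pvZipRows]
    rfl
  | cons q tl =>
    rw [← hsd]
    have hsdne : sd ≠ [] := by rw [hsd]; simp
    simp only [handle_data_driven_py_alt]
    have hmx : (sd.map (fun p => p.2.length)).foldl max 0 = pvMx sd := rfl
    rw [hmx]
    -- rewrite each padded column into the explicit padded form
    have hpadded : sd.map (fun p =>
        (p.1, p.2 ++ (List.replicate (pvMx sd - p.2.length)
          (PySem.List.slice p.2 (some (-1)) none)).flatten))
        = sd.map (fun p => (p.1, p.2 ++ List.replicate (pvMx sd - p.2.length) (p.2.getLastD ""))) := by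
      apply List.map_congr_left
      intro p hp
      rw [pv_pad_eq p.2 (hne p hp) (pvMx sd)]
    rw [hpadded]
    have hcolsne : (sd.map (fun p => (p.1, p.2 ++ List.replicate (pvMx sd - p.2.length)
        (p.2.getLastD "")))).map Prod.snd ≠ [] := by
      simp [hsd]
    have hcolslen : ∀ c ∈ (sd.map (fun p => (p.1, p.2 ++ List.replicate (pvMx sd - p.2.length)
        (p.2.getLastD "")))).map Prod.snd, c.length = pvMx sd := by
      intro c hc
      simp only [List.map_map, List.mem_map, Function.comp_def] at hc
      obtain ⟨p, hp, rfl⟩ := hc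
      exact pv_pad_len p.2 (hne p hp) (pvMx sd)
        (pv_le_foldl_max _ _ (List.mem_map_of_mem (f := fun p => p.2.length) hp))
    rw [pvZipRows_eq (pvMx sd) _ hcolsne hcolslen, List.map_map]
    apply List.map_congr_left
    intro i hi
    have hiLT : i < pvMx sd := List.mem_range.1 hi
    simp only [Function.comp_def, List.map_map]
    -- the keys.zip row list is sd mapped pointwise
    have hzip : (sd.map (fun x : String × List String => x.1)).zip
        (sd.map (fun x : String × List String =>
          (((x.2 ++ List.replicate (pvMx sd - x.2.length) (x.2.getLastD ""))[i]?).getD "")))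
        = sd.map (fun p => (p.1, (((p.2 ++ List.replicate (pvMx sd - p.2.length)
            (p.2.getLastD ""))[i]?).getD ""))) := List.zip_map'
    rw [hzip]
    have hndl : ((sd.map (fun p => ((p.1 : String), (((p.2 ++ List.replicate (pvMx sd - p.2.length)
        (p.2.getLastD ""))[i]?).getD "")))).map Prod.fst).Nodup := by
      rw [List.map_map]
      exact hnd
    have hofList : (PySem.Dict.ofList (sd.map (fun p => (p.1,
        (((p.2 ++ List.replicate (pvMx sd - p.2.length) (p.2.getLastD ""))[i]?).getD "")))) :
          PySem.Dict String String).items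
        = sd.map (fun p => (p.1, (((p.2 ++ List.replicate (pvMx sd - p.2.length)
            (p.2.getLastD ""))[i]?).getD ""))) := by
      show ((sd.map (fun p => ((p.1 : String), (((p.2 ++ List.replicate (pvMx sd - p.2.length)
          (p.2.getLastD ""))[i]?).getD "")))).foldl
        (fun d p => d.insert p.1 p.2) PySem.Dict.empty).items = _
      rw [PySem.Dict.items_foldl_insert_fresh]
      · simp [PySem.Dict.empty]
      · intro a _
        exact PySem.Dict.contains_empty a.1
      · exact hndl
    rw [hofList]
    apply List.map_congr_left
    intro p _
    exact congrArg _ (pv_pad_get p.2 (pvMx sd) i hiLT)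

-- ===== VERDICT (by name: the statement is the Claim_ definition above) =====
theorem handle_data_driven_py_spec : Claim_equal_handle_data_driven_py := by
  intro sd _ hpre
  obtain ⟨hnd, hcols | hcols⟩ := hpre
  · show handle_data_driven_py sd = handle_data_driven_py_alt sd
    rw [pv_a_eq sd hnd hcols, pv_alt_eq sd hnd hcols]
  · show handle_data_driven_py sd = handle_data_driven_py_alt sd
    have hmx : (sd.map (fun p => p.2.length)).foldl max 0 = 0 := by
      rw [pv_foldl_max_eq_zero]
      refine ⟨rfl, fun x hx => ?_⟩
      obtain ⟨p, hp, rfl⟩ := List.mem_map.1 hx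
      simp [hcols p hp]
    have hA : handle_data_driven_py sd = [] := by
      simp only [handle_data_driven_py]
      rw [pvZipLongest_eq 0 (sd.map Prod.snd) (by rw [List.map_map]; exact hmx)]
      rfl
    have hB : handle_data_driven_py_alt sd = [] := by
      simp only [handle_data_driven_py_alt]
      cases sd with
      | nil =>
        simp only [handle_data_driven_py_alt, List.map_nil]
        rw [pvZipRows]
        rfl
      | cons q tl =>
        have hq : q.2 = [] := hcols q List.mem_cons_self
        rw [pvZipRows, dif_pos]
        · rfl
        · simp [hq, PySem.List.slice_from_neg_one]
    rw [hA, hB]
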